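-- pv_equiv track=rewrite | github.com/hwennnn/SimpCity | test/game_test.py | parse_fileToList
-- ===== SOURCE A (Python) =====
-- def parse_fileToList(f):
--     temp = ''
--     row = []
--     grid = []
--     for i in f:
--         if i == ',':
--             row.append(temp)    # Add a coordinate to a row
--             temp = ''
--             continue    # Ignore ',' and not append (it will be 'None,' if not included)
--
--         if i == '\n':
--             row.append(temp)    # Add the last coordinate for the row as it has '\n' instead of ','
--             grid.append(row)    # Add the row into a list to form a grid
--             row = []
--             temp = ''
--
--         else:
--             temp += i
--     return grid
-- ===== SOURCE B (Python) =====
-- def parse_fileToList(f):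
--     return [seg.split(',') for seg in f.split('\n')[:-1]]
-- ===== Notes on version B (the rewrite author's own statement) =====
-- stated objective: idiomatic
-- what changed: Replaced the char-by-char accumulator state machine with a one-liner: split the text on newlines, drop the trailing segment (A only emits rows at a newline), and split each remaining line on commas.
import Mathlib
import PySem

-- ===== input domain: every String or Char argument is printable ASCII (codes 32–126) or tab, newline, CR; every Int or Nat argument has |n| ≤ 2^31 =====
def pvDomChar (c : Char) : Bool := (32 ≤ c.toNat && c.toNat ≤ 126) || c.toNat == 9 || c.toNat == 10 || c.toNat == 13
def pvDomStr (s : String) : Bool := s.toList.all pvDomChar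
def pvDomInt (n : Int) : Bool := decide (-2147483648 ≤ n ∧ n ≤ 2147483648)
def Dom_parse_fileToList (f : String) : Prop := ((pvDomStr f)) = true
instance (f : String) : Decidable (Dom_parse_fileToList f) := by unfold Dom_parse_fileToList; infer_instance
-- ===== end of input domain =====

-- B replaces A's char-by-char accumulator state machine with split-on-newline /
-- drop-trailing-segment / split-each-line-on-comma (idiomatic, same cost).


-- ===== PORT A =====
-- A's loop: state (temp, row, grid); temp kept as List Char (Python string accumulation)
def pvLoopA : List Char → List Char → List String → List (List String) → List (List String)
  | [], _, _, grid => grid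
  | i :: rest, temp, row, grid =>
    if i = ',' then pvLoopA rest [] (row ++ [String.mk temp]) grid
    else if i = '\n' then pvLoopA rest [] [] (grid ++ [row ++ [String.mk temp]])
    else pvLoopA rest (temp ++ [i]) row grid

def parse_fileToList (f : String) : List (List String) :=
  pvLoopA f.toList [] [] []

-- ===== PORT B =====
-- Source B: [seg.split(',') for seg in f.split('\n')[:-1]]
-- (str.split with a non-empty separator is List.splitOn on the code points)
def parse_fileToList_alt (f : String) : List (List String) :=
  ((f.toList.splitOn '\n').dropLast).map (fun seg => (seg.splitOn ',').map (fun cs => String.mk cs))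

-- ===== PRECONDITION & SPEC =====
def Spec_parse_fileToList (f : String) (out : List (List String)) : Prop := out = parse_fileToList_alt f
instance (f : String) (out : List (List String)) : Decidable (Spec_parse_fileToList f out) := by unfold Spec_parse_fileToList; infer_instance

-- ===== CLAIM (what is proved, stated in full; the proofs are below) =====
def Claim_equal_parse_fileToList : Prop := ∀ (f : String), Dom_parse_fileToList f → Spec_parse_fileToList f (parse_fileToList f)

-- ===== LEMMAS AND PROOFS =====

-- one comma-split line as a row of strings
def pvPlain (seg : List Char) : List String := (seg.splitOn ',').map (fun cs => String.mk cs)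

-- the rows produced from the newline segments, the first one in the context (temp, row)
def pvRows (temp : List Char) (row : List String) : List (List Char) → List (List String)
  | [] => []
  | [_] => []
  | s :: s' :: rest => (row ++ pvPlain (temp ++ s)) :: pvRows [] [] (s' :: rest)

theorem pvSplitOn_cons (a x : Char) (xs : List Char) :
    (x :: xs).splitOn a = if x = a then [] :: xs.splitOn a
      else (xs.splitOn a).modifyHead (List.cons x) := by
  simp [List.splitOn, List.splitOnP_cons]

theorem pvSplitOn_single {t : List Char} {a : Char} (h : a ∉ t) : t.splitOn a = [t] := by
  simp only [List.splitOn]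
  apply List.splitOnP_eq_single
  intro x hx hb
  exact h ((beq_iff_eq.mp hb) ▸ hx)

theorem pvSplitOn_ne_nil (a : Char) (xs : List Char) : xs.splitOn a ≠ [] :=
  List.splitOnP_ne_nil _ _

theorem pvPlain_nosep {t : List Char} (h : ',' ∉ t) : pvPlain t = [String.mk t] := by
  simp [pvPlain, pvSplitOn_single h]

theorem pvPlain_prepend {t : List Char} (h : ',' ∉ t) (s : List Char) :
    pvPlain (t ++ ',' :: s) = String.mk t :: pvPlain s := by
  have hsplit : (t ++ ',' :: s).splitOn ',' = t :: s.splitOn ',' := by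
    simp only [List.splitOn]
    rw [List.splitOnP_append_cons _ t s ',' (by simp)]
    have : t.splitOnP (· == ',') = [t] := by
      apply List.splitOnP_eq_single
      intro x hx hb
      exact h ((beq_iff_eq.mp hb) ▸ hx)
    rw [this]; rfl
  simp [pvPlain, hsplit]

-- the loop invariant: pvLoopA computes grid ++ the rows of the newline segments
theorem pvLoopA_eq (cs : List Char) :
    ∀ (temp : List Char) (row : List String) (grid : List (List String)),
      ',' ∉ temp →
      pvLoopA cs temp row grid = grid ++ pvRows temp row (cs.splitOn '\n') := by
  induction cs with
  | nil =>
    intro temp row grid _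
    simp [pvLoopA, List.splitOn, List.splitOnP_nil, pvRows]
  | cons i rest ih =>
    intro temp row grid h
    rcases hs : rest.splitOn '\n' with _ | ⟨s0, ss⟩
    · exact absurd hs (pvSplitOn_ne_nil _ _)
    by_cases hc : i = ','
    · subst hc
      rw [pvLoopA, if_pos rfl, ih [] (row ++ [String.mk temp]) grid (by simp),
        pvSplitOn_cons, if_neg (by decide), hs]
      rcases ss with _ | ⟨s1, ss'⟩
      · simp [pvRows]
      · simp [pvRows, pvPlain_prepend h]
    · by_cases hn : i = '\n'
      · subst hn
        rw [pvLoopA, if_neg (by decide), if_pos rfl,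
          ih [] [] (grid ++ [row ++ [String.mk temp]]) (by simp),
          pvSplitOn_cons, if_pos rfl, hs]
        rcases ss with _ | ⟨s1, ss'⟩
        · simp [pvRows, pvPlain_nosep h]
        · simp [pvRows, pvPlain_nosep h]
      · rw [pvLoopA, if_neg hc, if_neg hn,
          ih (temp ++ [i]) row grid (by
            intro hm
            rcases List.mem_append.1 hm with h1 | h1
            · exact h h1
            · simp at h1; exact hc h1.symm),
          pvSplitOn_cons, if_neg hn, hs]
        rcases ss with _ | ⟨s1, ss'⟩
        · simp [pvRows]
        · simp [pvRows]

-- with empty context, the rows are precisely (map pvPlain) of dropLast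
theorem pvRows_empty (segs : List (List Char)) :
    pvRows [] [] segs = (segs.dropLast).map pvPlain := by
  induction segs with
  | nil => simp [pvRows]
  | cons s rest ih =>
    rcases rest with _ | ⟨s1, ss⟩
    · simp [pvRows]
    · rw [pvRows]
      simp only [List.dropLast_cons₂, List.map]
      rw [ih]
      simp

-- ===== VERDICT (by name: the statement is the Claim_ definition above) =====
theorem parse_fileToList_spec : Claim_equal_parse_fileToList := by
  intro f _
  unfold Spec_parse_fileToList parse_fileToList parse_fileToList_alt
  rw [pvLoopA_eq f.toList [] [] [] (by simp), pvRows_empty]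
  rfl
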